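-- pv_equiv track=rewrite | github.com/VincentDekkers/TheiQgame | main-online.py | removefrommatrix
-- ===== SOURCE A (Python) =====
-- def removefrommatrix(grid, item):
--     mini = minj = 13
--     for i,row in enumerate(grid):
--         for j,el in enumerate(row):
--             if el == item:
--                 grid[i][j] = 0
--                 if i < mini:
--                     mini = i
--                 if j < minj:
--                     minj = j
--     return (mini,minj,)
-- ===== SOURCE B (Python) =====
-- def removefrommatrix(grid, item):
--     # first matching row index (capped at 13); rows are scanned only until a membership test succeeds
--     mini = min(next((i for i, row in enumerate(grid) if item in row), 13), 13)
--     # first-occurrence column per matching row, then a single capped minimum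
--     cols = [row.index(item) for row in grid if item in row]
--     minj = min(cols + [13])
--     # zero the matching cells row by row (same in-place mutation as A)
--     for row in grid:
--         row[:] = [0 if el == item else el for el in row]
--     return (mini, minj)
-- ===== Notes on version B (the rewrite author's own statement) =====
-- stated objective: alternative
-- what changed: Instead of A's fused nested scan with two running capped minima, B finds the first row containing the item via membership tests with early exit (mini), takes each matching row's first-occurrence column with row.index and reduces those with one capped min (minj), and zeroes matching cells in a separate per-row rebuild pass.
import Mathlib
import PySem

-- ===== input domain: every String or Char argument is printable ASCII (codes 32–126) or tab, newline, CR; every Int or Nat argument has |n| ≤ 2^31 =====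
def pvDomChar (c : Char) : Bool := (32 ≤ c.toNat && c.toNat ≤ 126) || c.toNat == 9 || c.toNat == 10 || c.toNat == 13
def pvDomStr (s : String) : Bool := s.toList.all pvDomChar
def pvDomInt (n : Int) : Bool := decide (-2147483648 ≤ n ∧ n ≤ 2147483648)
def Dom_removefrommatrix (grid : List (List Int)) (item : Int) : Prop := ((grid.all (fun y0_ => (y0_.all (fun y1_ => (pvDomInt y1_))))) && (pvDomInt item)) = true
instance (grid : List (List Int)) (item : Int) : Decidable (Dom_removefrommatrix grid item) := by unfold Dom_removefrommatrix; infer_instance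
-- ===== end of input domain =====

-- B replaces A's fused nested scan with running minima by a first-matching-row search (membership tests
-- with early exit) plus per-row first-occurrence indices reduced with one capped min (alternative, same
-- cost); both Pythons mutate grid identically, the equivalence proved here is about the return value.

-- ===== PORT A =====
def removefrommatrix (grid : List (List Int)) (item : Int) : Int × Int :=
  (PySem.List.enumerate grid).foldl (fun (s : Int × Int) (p : Int × List Int) =>
    (PySem.List.enumerate p.2).foldl (fun (s : Int × Int) (q : Int × Int) =>
      if q.2 = item then
        ((if p.1 < s.1 then p.1 else s.1), (if q.1 < s.2 then q.1 else s.2))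
      else s) s) (13, 13)

-- ===== PORT B =====
-- port of Source B's `next((i for i, row in enumerate(grid) if item in row), 13)`: scan rows, stop at the
-- first membership hit, default 13
def rfmFirstRow (item : Int) : List (List Int) → Int → Int
  | [], _ => 13
  | r :: rs, i => if r.contains item then i else rfmFirstRow item rs (i + 1)

def removefrommatrix_alt (grid : List (List Int)) (item : Int) : Int × Int :=
  let mini := min (rfmFirstRow item grid 0) 13
  -- `[row.index(item) for row in grid if item in row]`: the filter guarantees index? is some,
  -- so the getD 0 default is never used
  let cols : List Int := (grid.filter (fun row => row.contains item)).map
      (fun row => (((PySem.List.index? row item).getD 0 : Nat) : Int))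
  -- `min(cols + [13])`: the list is nonempty, so min? is always some and getD's default is never used
  let minj := (PySem.List.min? (cols ++ [13]) (fun y => y)).getD 13
  (mini, minj)

-- ===== PRECONDITION & SPEC =====
def Spec_removefrommatrix (grid : List (List Int)) (item : Int) (out : Int × Int) : Prop := out = removefrommatrix_alt grid item
instance (grid : List (List Int)) (item : Int) (out : Int × Int) : Decidable (Spec_removefrommatrix grid item out) := by unfold Spec_removefrommatrix; infer_instance

-- ===== CLAIM (what is proved, stated in full; the proofs are below) =====
def Claim_equal_removefrommatrix : Prop := ∀ (grid : List (List Int)) (item : Int), Dom_removefrommatrix grid item → Spec_removefrommatrix grid item (removefrommatrix grid item)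

-- ===== LEMMAS AND PROOFS =====

-- A's inner loop over one row, with the row index i fixed: characterised by membership and first index
lemma rfm_inner (item i : Int) (row : List Int) (k m n : Int) :
    (PySem.List.enumerate row k).foldl (fun (s : Int × Int) (q : Int × Int) =>
      if q.2 = item then
        ((if i < s.1 then i else s.1), (if q.1 < s.2 then q.1 else s.2))
      else s) (m, n)
    = ((if row.contains item then min m i else m),
       (match PySem.List.index? row item with
        | some j => min n (k + (j : Int))
        | none => n)) := by
  induction row generalizing k m n with
  | nil => simp [PySem.List.index?_eq_idxOf?]
  | cons x rest ih =>
    rw [PySem.List.enumerate_cons, List.foldl_cons]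
    by_cases h : x = item
    · subst h
      simp only [ite_true, PySem.List.index?_cons_self]
      rw [ih]
      have hm : (if (i : Int) < m then i else m) = min m i := by rw [min_def]; split_ifs <;> omega
      have hn : (if (k : Int) < n then k else n) = min n k := by rw [min_def]; split_ifs <;> omega
      rw [hm, hn, Prod.mk.injEq]
      refine ⟨?_, ?_⟩
      · have hcx : (x :: rest).contains x = true := by simp
        rw [if_pos hcx]
        split_ifs with hc
        · rw [min_assoc, min_self]
        · rfl
      · rcases hmi : PySem.List.index? rest x with _ | j
        · simp
        · have hmin : min (min n k) (k + 1 + (j : Int)) = min n k := by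
            have : (0:Int) ≤ (j : Int) := Int.natCast_nonneg j
            rw [min_def, min_def]; split_ifs <;> omega
          simp [hmin]
    · have hx : (x = item) = False := by simp [h]
      simp only [hx, ite_false]
      rw [ih, PySem.List.index?_cons_of_ne rest h, Prod.mk.injEq]
      have hcont : (x :: rest).contains item = rest.contains item := by
        simp [Ne.symm h]
      rw [hcont]
      refine ⟨rfl, ?_⟩
      rcases hmi : PySem.List.index? rest item with _ | j
      · simp
      · simp only [Option.map_some]
        congr 1
        push_cast
        ring

-- rfmFirstRow never returns an index below its start when a match exists
lemma rfm_firstRow_ge (item : Int) (L : List (List Int)) (i : Int)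
    (h : ∃ r ∈ L, r.contains item = true) : i ≤ rfmFirstRow item L i := by
  induction L generalizing i with
  | nil => simp at h
  | cons r rs ih =>
    rw [rfmFirstRow]
    split_ifs with hc
    · exact le_refl i
    · rcases h with ⟨r', hr', hr'c⟩
      rw [List.mem_cons] at hr'
      rcases hr' with rfl | hr'
      · exact absurd hr'c (by simpa using hc)
      · have := ih (i + 1) ⟨r', hr', hr'c⟩
        omega

lemma rfm_firstRow_none (item : Int) (L : List (List Int)) (i : Int)
    (h : ¬ ∃ r ∈ L, r.contains item = true) : rfmFirstRow item L i = 13 := by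
  induction L generalizing i with
  | nil => rfl
  | cons r rs ih =>
    rw [rfmFirstRow]
    split_ifs with hc
    · exact absurd ⟨r, by simp, hc⟩ h
    · refine ih (i + 1) ?_
      rintro ⟨r', hr', hc'⟩
      exact h ⟨r', by simp [hr'], hc'⟩

-- A's outer loop characterised: first matching row index and fold of per-row first indices
lemma rfm_outer (item : Int) (L : List (List Int)) (i m n : Int) :
    (PySem.List.enumerate L i).foldl (fun (s : Int × Int) (p : Int × List Int) =>
      (PySem.List.enumerate p.2).foldl (fun (s : Int × Int) (q : Int × Int) =>
        if q.2 = item then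
          ((if p.1 < s.1 then p.1 else s.1), (if q.1 < s.2 then q.1 else s.2))
        else s) s) (m, n)
    = ((if ∃ r ∈ L, r.contains item = true then min m (rfmFirstRow item L i) else m),
       ((L.filter (fun row => row.contains item)).map
         (fun row => (((PySem.List.index? row item).getD 0 : Nat) : Int))).foldl min n) := by
  induction L generalizing i m n with
  | nil => simp
  | cons r rs ih =>
    rw [PySem.List.enumerate_cons, List.foldl_cons, rfm_inner, ih, rfmFirstRow]
    by_cases hc : r.contains item = true
    · have hmem : item ∈ r := by simpa using hc
      rcases hj : PySem.List.index? r item with _ | j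
      · rw [PySem.List.index?_eq_idxOf?] at hj
        simp [List.idxOf?_eq_none_iff] at hj
        exact absurd hmem hj
      · have hex : (∃ r' ∈ r :: rs, r'.contains item = true) := ⟨r, by simp, hc⟩
        simp only [hc, ite_true, hex, List.filter_cons, List.map_cons, List.foldl_cons, hj,
          Option.getD_some, zero_add, Prod.mk.injEq]
        refine ⟨?_, trivial⟩
        by_cases hrs : ∃ r' ∈ rs, r'.contains item = true
        · simp only [hrs, ite_true]
          have h1 := rfm_firstRow_ge item rs (i + 1) hrs
          simp only [min_def]; split_ifs <;> omega
        · simp only [hrs, ite_false]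
    · have hnm : item ∉ r := fun hm => hc (by simpa using hm)
      have hj : PySem.List.index? r item = none := by
        rw [PySem.List.index?_eq_idxOf?]; simpa [List.idxOf?_eq_none_iff] using hnm
      have hex : (∃ r' ∈ r :: rs, r'.contains item = true) ↔ (∃ r' ∈ rs, r'.contains item = true) := by
        constructor
        · rintro ⟨r', hr', hc'⟩
          rw [List.mem_cons] at hr'
          rcases hr' with rfl | hmem'
          · exact absurd hc' hc
          · exact ⟨r', hmem', hc'⟩
        · rintro ⟨r', hr', hc'⟩; exact ⟨r', by simp [hr'], hc'⟩
      have hj' : List.idxOf? item r = none := by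
        have := hj
        rw [PySem.List.index?_eq_idxOf?] at this
        exact this
      simp [hnm, hj']

-- foldl min pulls an initial min out front
lemma rfm_foldl_min_comm (l : List Int) (a b : Int) :
    l.foldl min (min a b) = min a (l.foldl min b) := by
  induction l generalizing b with
  | nil => rfl
  | cons x t ih => simp only [List.foldl_cons, min_assoc, ih]

-- min(cols + [13]) equals the running capped minimum
lemma rfm_min_append (cols : List Int) :
    (PySem.List.min? (cols ++ [13]) (fun y => y)).getD 13 = cols.foldl min 13 := by
  cases cols with
  | nil => simp [PySem.List.min?]
  | cons c cs =>
    rw [List.cons_append, PySem.List.min?_id_cons, Option.getD_some, List.foldl_append,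
      List.foldl_cons]
    simp only [List.foldl_cons, List.foldl_nil]
    rw [rfm_foldl_min_comm cs 13 c, min_comm]

-- ===== VERDICT (by name: the statement is the Claim_ definition above) =====
theorem removefrommatrix_spec : Claim_equal_removefrommatrix := by
  intro grid item _
  show _ = _
  rw [removefrommatrix, removefrommatrix_alt, rfm_outer, rfm_min_append, Prod.mk.injEq]
  refine ⟨?_, rfl⟩
  by_cases hex : ∃ r ∈ grid, r.contains item = true
  · simp only [hex, ite_true, min_comm]
  · simp only [hex, ite_false, rfm_firstRow_none item grid 0 hex, min_self]
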